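-- pv_equiv track=rewrite | github.com/hyeonbin123/CordingTest | baekjoon/1233.py | find_most_common_sum
-- ===== SOURCE A (Python) =====
-- def find_most_common_sum(s1, s2, s3):
--     min_sum = 3
--     max_sum = s1 + s2 + s3
--
--     frequency = [0] * (max_sum + 1)
--
--     for i in range(1, s1 + 1):
--         for j in range(1, s2 + 1):
--             for k in range(1, s3 + 1):
--                 frequency[i + j + k] += 1
--
--     max_frequency = 0
--     most_common_sum = 0
--     for sum_value in range(min_sum, max_sum + 1):
--         if frequency[sum_value] > max_frequency:
--             max_frequency = frequency[sum_value]
--             most_common_sum = sum_value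
--
--     return most_common_sum
-- ===== SOURCE B (Python) =====
-- def find_most_common_sum(s1, s2, s3):
--     if s1 <= 0 or s2 <= 0 or s3 <= 0:
--         return 0
--     def conv(f, g):
--         if not f or not g:
--             return []
--         h = [0] * (len(f) + len(g) - 1)
--         for i, x in enumerate(f):
--             for j, y in enumerate(g):
--                 h[i + j] += x * y
--         return h
--
--     dist = conv(conv([1] * s1, [1] * s2), [1] * s3)
--     best_idx = -1
--     best = 0
--     for idx, c in enumerate(dist):
--         if c > best:
--             best = c
--             best_idx = idx
--     return best_idx + 3 if best_idx >= 0 else 0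
-- ===== Notes on version B (the rewrite author's own statement) =====
-- stated objective: faster
-- what changed: Replaces the O(s1*s2*s3) triple loop over all face triples by two successive convolutions of the per-die uniform distributions, then a single argmax scan over the resulting sum distribution.
import Mathlib
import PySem

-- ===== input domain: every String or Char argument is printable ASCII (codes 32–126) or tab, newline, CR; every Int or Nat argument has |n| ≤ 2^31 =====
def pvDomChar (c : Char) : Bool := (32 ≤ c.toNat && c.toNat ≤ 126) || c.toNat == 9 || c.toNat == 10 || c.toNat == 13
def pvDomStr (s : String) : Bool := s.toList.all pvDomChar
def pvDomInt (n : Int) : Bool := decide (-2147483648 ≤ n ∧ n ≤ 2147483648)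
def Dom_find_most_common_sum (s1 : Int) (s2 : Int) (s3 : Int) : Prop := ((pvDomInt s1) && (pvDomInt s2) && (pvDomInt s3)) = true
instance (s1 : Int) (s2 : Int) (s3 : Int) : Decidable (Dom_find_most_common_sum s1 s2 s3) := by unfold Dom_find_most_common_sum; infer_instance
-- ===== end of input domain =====

-- B replaces A's O(s1*s2*s3) triple loop by two successive convolutions of the per-die
-- distributions followed by one argmax scan (asymptotically faster); return values proved equal.

-- ===== PORT A =====
-- 'frequency[t] += 1' on an always-in-range nonnegative index (exact: Python raises only out of range, which A never is)
def pvIncAt (l : List Int) (n : Nat) : List Int := l.set n (l.getD n 0 + 1)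

def find_most_common_sum (s1 : Int) (s2 : Int) (s3 : Int) : Int :=
  let max_sum := s1 + s2 + s3
  let frequency : List Int := PySem.List.pyRepeat [0] (max_sum + 1)
  let frequency :=
    (PySem.List.pyRange 1 (s1 + 1) 1).foldl (fun f i =>
      (PySem.List.pyRange 1 (s2 + 1) 1).foldl (fun f j =>
        (PySem.List.pyRange 1 (s3 + 1) 1).foldl (fun f k =>
          pvIncAt f (i + j + k).toNat) f) f) frequency
  let r :=
    (PySem.List.pyRange 3 (max_sum + 1) 1).foldl (fun (st : Int × Int) s =>
      if frequency.getD s.toNat 0 > st.1 then (frequency.getD s.toNat 0, s) else st) (0, 0)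
  r.2

-- ===== PORT B =====
-- 'h[i+j] += x*y' on an always-in-range nonnegative index (exact where Python does not raise, which it never does here)
def pvAddAt (l : List Int) (n : Nat) (v : Int) : List Int := l.set n (l.getD n 0 + v)

def pvConv (f g : List Int) : List Int :=
  if f = [] ∨ g = [] then []
  else
    (PySem.List.enumerate f 0).foldl (fun h p =>
      (PySem.List.enumerate g 0).foldl (fun h q =>
        pvAddAt h (p.1 + q.1).toNat (p.2 * q.2)) h)
      (List.replicate (f.length + g.length - 1) 0)

def find_most_common_sum_alt (s1 : Int) (s2 : Int) (s3 : Int) : Int :=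
  if s1 ≤ 0 ∨ s2 ≤ 0 ∨ s3 ≤ 0 then 0
  else
  let dist := pvConv (pvConv (PySem.List.pyRepeat [1] s1) (PySem.List.pyRepeat [1] s2))
      (PySem.List.pyRepeat [1] s3)
  let r :=
    (PySem.List.enumerate dist 0).foldl (fun (st : Int × Int) p =>
      if p.2 > st.2 then (p.1, p.2) else st) (-1, 0)
  if r.1 ≥ 0 then r.1 + 3 else 0

-- ===== PRECONDITION & SPEC =====
def Spec_find_most_common_sum (s1 : Int) (s2 : Int) (s3 : Int) (out : Int) : Prop := out = find_most_common_sum_alt s1 s2 s3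
instance (s1 : Int) (s2 : Int) (s3 : Int) (out : Int) : Decidable (Spec_find_most_common_sum s1 s2 s3 out) := by unfold Spec_find_most_common_sum; infer_instance

-- ===== CLAIM (what is proved, stated in full; the proofs are below) =====
def Claim_equal_find_most_common_sum : Prop := ∀ (s1 : Int) (s2 : Int) (s3 : Int), Dom_find_most_common_sum s1 s2 s3 → Spec_find_most_common_sum s1 s2 s3 (find_most_common_sum s1 s2 s3)

-- ===== LEMMAS AND PROOFS =====

-- proof-side names for the two intermediate data structures
def freqA (s1 s2 s3 : Int) : List Int :=
  (PySem.List.pyRange 1 (s1 + 1) 1).foldl (fun f i =>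
    (PySem.List.pyRange 1 (s2 + 1) 1).foldl (fun f j =>
      (PySem.List.pyRange 1 (s3 + 1) 1).foldl (fun f k =>
        pvIncAt f (i + j + k).toNat) f) f) (PySem.List.pyRepeat [0] (s1 + s2 + s3 + 1))

def distB (s1 s2 s3 : Int) : List Int :=
  pvConv (pvConv (PySem.List.pyRepeat [1] s1) (PySem.List.pyRepeat [1] s2))
    (PySem.List.pyRepeat [1] s3)

lemma A_eq (s1 s2 s3 : Int) :
    find_most_common_sum s1 s2 s3 =
      ((PySem.List.pyRange 3 (s1 + s2 + s3 + 1) 1).foldl (fun (st : Int × Int) s =>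
        if (freqA s1 s2 s3).getD s.toNat 0 > st.1 then ((freqA s1 s2 s3).getD s.toNat 0, s) else st)
        (0, 0)).2 := rfl

lemma B_eq (s1 s2 s3 : Int) (h : ¬ (s1 ≤ 0 ∨ s2 ≤ 0 ∨ s3 ≤ 0)) :
    find_most_common_sum_alt s1 s2 s3 =
      (let r := (PySem.List.enumerate (distB s1 s2 s3) 0).foldl (fun (st : Int × Int) p =>
          if p.2 > st.2 then (p.1, p.2) else st) (-1, 0);
       if r.1 ≥ 0 then r.1 + 3 else 0) := by
  unfold find_most_common_sum_alt
  rw [if_neg h]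
  rfl

lemma pvIncAt_eq (l : List Int) (n : Nat) : pvIncAt l n = pvAddAt l n 1 := rfl

lemma pv_length_addAt (l : List Int) (n : Nat) (v : Int) : (pvAddAt l n v).length = l.length := by
  simp [pvAddAt]

lemma pv_getD_addAt (l : List Int) (n : Nat) (v : Int) (t : Nat) (hn : n < l.length) :
    (pvAddAt l n v).getD t 0 = l.getD t 0 + if n = t then v else 0 := by
  by_cases h : n = t
  · subst h
    simp [pvAddAt, List.getD_eq_getElem?_getD, hn]
  · simp [pvAddAt, List.getD_eq_getElem?_getD, h]

lemma pv_length_foldl_addAt {A : Type} (ix : A → Nat) (val : A → Int) :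
    ∀ (ups : List A) (l : List Int),
      (ups.foldl (fun l x => pvAddAt l (ix x) (val x)) l).length = l.length := by
  intro ups
  induction ups with
  | nil => intro l; rfl
  | cons x ups ih => intro l; rw [List.foldl_cons, ih, pv_length_addAt]

lemma pv_getD_foldl_addAt {A : Type} (ix : A → Nat) (val : A → Int) :
    ∀ (ups : List A) (l : List Int), (∀ x ∈ ups, ix x < l.length) → ∀ (t : Nat),
      (ups.foldl (fun l x => pvAddAt l (ix x) (val x)) l).getD t 0
        = l.getD t 0 + (ups.map (fun x => if ix x = t then val x else 0)).sum := by
  intro ups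
  induction ups with
  | nil => intro l _ t; simp
  | cons x ups ih =>
      intro l h t
      rw [List.foldl_cons, ih _ (fun y hy => by
        rw [pv_length_addAt]; exact h y (List.mem_cons_of_mem _ hy)) t,
        pv_getD_addAt _ _ _ _ (h x (List.mem_cons_self))]
      simp only [List.map_cons, List.sum_cons]
      ring

lemma pv_sum_flatMap {A : Type} (xs : List A) (g : A → List Int) :
    (xs.flatMap g).sum = (xs.map (fun x => (g x).sum)).sum := by
  induction xs with
  | nil => simp
  | cons x xs ih => simp [List.flatMap_cons, ih]

lemma pv_sum_flatMap_map {A B : Type} (xs : List A) (g : A → List B) (f : B → Int) :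
    ((xs.flatMap g).map f).sum = (xs.map (fun x => ((g x).map f).sum)).sum := by
  rw [List.map_flatMap, pv_sum_flatMap]

lemma pv_sum_range (n : Nat) (f : Nat → Int) :
    ((List.range n).map f).sum = ∑ i ∈ Finset.range n, f i := by
  induction n with
  | zero => simp
  | succ n ih => simp [List.range_succ, Finset.sum_range_succ, ih]

lemma pv_foldl3 {A B C D : Type} (la : List A) (lb : List B) (lc : List C)
    (F : D → A → B → C → D) (init : D) :
    la.foldl (fun d i => lb.foldl (fun d j => lc.foldl (fun d k => F d i j k) d) d) init
      = (la.flatMap (fun i => lb.flatMap (fun j => lc.map (fun k => (i, j, k))))).foldl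
          (fun d x => F d x.1 x.2.1 x.2.2) init := by
  simp only [List.foldl_flatMap, List.foldl_map]

lemma pv_foldl2 {A B D : Type} (la : List A) (lb : List B)
    (F : D → A → B → D) (init : D) :
    la.foldl (fun d i => lb.foldl (fun d j => F d i j) d) init
      = (la.flatMap (fun i => lb.map (fun j => (i, j)))).foldl
          (fun d x => F d x.1 x.2) init := by
  simp only [List.foldl_flatMap, List.foldl_map]

lemma pv_getD_replicate_zero (m t : Nat) : (List.replicate m (0 : Int)).getD t 0 = 0 := by
  simp [List.getD_eq_getElem?_getD, List.getElem?_replicate]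
  split <;> rfl

-- A's frequency table: entry t counts the face triples summing to t
lemma freqA_getD (a b c : Nat) (t : Nat) :
    (freqA a b c).getD t 0
      = ∑ i ∈ Finset.range a, ∑ j ∈ Finset.range b, ∑ k ∈ Finset.range c,
          if i + j + k + 3 = t then (1 : Int) else 0 := by
  unfold freqA
  have h1 : PySem.List.pyRange 1 ((a : Int) + 1) 1 = (List.range a).map (fun i : Nat => (1 : Int) + i) := by
    rw [PySem.List.pyRange_one]; norm_num
  have h2 : PySem.List.pyRange 1 ((b : Int) + 1) 1 = (List.range b).map (fun j : Nat => (1 : Int) + j) := by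
    rw [PySem.List.pyRange_one]; norm_num
  have h3 : PySem.List.pyRange 1 ((c : Int) + 1) 1 = (List.range c).map (fun k : Nat => (1 : Int) + k) := by
    rw [PySem.List.pyRange_one]; norm_num
  rw [h1, h2, h3]
  simp only [List.foldl_map, pvIncAt_eq]
  rw [pv_foldl3 (List.range a) (List.range b) (List.range c)
    (fun f i j k => pvAddAt f (((1 : Int) + i) + ((1 : Int) + j) + ((1 : Int) + k)).toNat 1)]
  have hrep : PySem.List.pyRepeat [(0 : Int)] ((a : Int) + b + c + 1)
      = List.replicate (a + b + c + 1) 0 := by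
    have h' : ((a : Int) + b + c + 1).toNat = a + b + c + 1 := by omega
    rw [PySem.List.pyRepeat_singleton, h']
  rw [hrep]
  have hin : ∀ x ∈ (List.range a).flatMap (fun i => (List.range b).flatMap
      (fun j => (List.range c).map (fun k => (i, j, k)))),
      (fun x : Nat × Nat × Nat =>
        (((1 : Int) + x.1) + ((1 : Int) + x.2.1) + ((1 : Int) + x.2.2)).toNat) x
        < (List.replicate (a + b + c + 1) (0 : Int)).length := by
    intro x hx
    simp only [List.mem_flatMap, List.mem_map, List.mem_range] at hx
    obtain ⟨i, hi, j, hj, k, hk, rfl⟩ := hx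
    simp only [List.length_replicate]
    omega
  rw [pv_getD_foldl_addAt
    (fun x : Nat × Nat × Nat => (((1 : Int) + x.1) + ((1 : Int) + x.2.1) + ((1 : Int) + x.2.2)).toNat)
    (fun _ => (1 : Int)) _ _ hin t]
  rw [pv_getD_replicate_zero]
  have e3 : ∀ (i j : Nat),
      (((List.range c).map (fun k => (i, j, k))).map
        (fun x : Nat × Nat × Nat =>
          if (((1 : Int) + x.1) + ((1 : Int) + x.2.1) + ((1 : Int) + x.2.2)).toNat = t
          then (1 : Int) else 0)).sum
      = ∑ k ∈ Finset.range c, if i + j + k + 3 = t then (1 : Int) else 0 := by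
    intro i j
    rw [List.map_map, pv_sum_range]
    refine Finset.sum_congr rfl fun k _ => ?_
    simp only [Function.comp]
    exact if_congr (by omega) rfl rfl
  have e2 : ∀ (i : Nat),
      (((List.range b).flatMap (fun j => (List.range c).map (fun k => (i, j, k)))).map
        (fun x : Nat × Nat × Nat =>
          if (((1 : Int) + x.1) + ((1 : Int) + x.2.1) + ((1 : Int) + x.2.2)).toNat = t
          then (1 : Int) else 0)).sum
      = ∑ j ∈ Finset.range b, ∑ k ∈ Finset.range c,
          if i + j + k + 3 = t then (1 : Int) else 0 := by
    intro i
    rw [pv_sum_flatMap_map]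
    simp only [e3]
    rw [pv_sum_range]
  rw [pv_sum_flatMap_map]
  simp only [e2]
  rw [pv_sum_range, zero_add]

lemma pvConv_length (f g : List Int) (hf : f ≠ []) (hg : g ≠ []) :
    (pvConv f g).length = f.length + g.length - 1 := by
  unfold pvConv
  rw [if_neg (by simp [hf, hg])]
  rw [PySem.List.enumerate_eq_map_pyRange (d := 0), PySem.List.enumerate_eq_map_pyRange (d := 0)]
  simp only [List.foldl_map]
  rw [pv_foldl2]
  rw [pv_length_foldl_addAt]
  simp

lemma pvConv_getD (f g : List Int) (hf : f ≠ []) (hg : g ≠ []) (t : Nat) :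
    (pvConv f g).getD t 0
      = ∑ i ∈ Finset.range f.length, ∑ j ∈ Finset.range g.length,
          if i + j = t then f.getD i 0 * g.getD j 0 else 0 := by
  have hfl : 1 ≤ f.length := by
    cases f with
    | nil => exact absurd rfl hf
    | cons x xs => simp
  have hgl : 1 ≤ g.length := by
    cases g with
    | nil => exact absurd rfl hg
    | cons x xs => simp
  unfold pvConv
  rw [if_neg (by simp [hf, hg])]
  have henf : PySem.List.enumerate f 0
      = (List.range f.length).map (fun i : Nat => ((i : Int), f.getD i 0)) := by
    rw [PySem.List.enumerate_eq_map_pyRange (d := 0)]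
    rw [show PySem.List.len f = (f.length : Int) from rfl]
    rw [PySem.List.pyRange_one]
    simp [List.map_map, Function.comp, PySem.List.pyGetD_natCast]
  have heng : PySem.List.enumerate g 0
      = (List.range g.length).map (fun j : Nat => ((j : Int), g.getD j 0)) := by
    rw [PySem.List.enumerate_eq_map_pyRange (d := 0)]
    rw [show PySem.List.len g = (g.length : Int) from rfl]
    rw [PySem.List.pyRange_one]
    simp [List.map_map, Function.comp, PySem.List.pyGetD_natCast]
  rw [henf, heng]
  simp only [List.foldl_map]
  rw [pv_foldl2 (List.range f.length) (List.range g.length)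
    (fun h i j => pvAddAt h (((i : Nat) : Int) + ((j : Nat) : Int)).toNat (f.getD i 0 * g.getD j 0))]
  have hin : ∀ x ∈ (List.range f.length).flatMap
      (fun i => (List.range g.length).map (fun j => (i, j))),
      (fun x : Nat × Nat => (((x.1 : Nat) : Int) + ((x.2 : Nat) : Int)).toNat) x
        < (List.replicate (f.length + g.length - 1) (0 : Int)).length := by
    intro x hx
    simp only [List.mem_flatMap, List.mem_map, List.mem_range] at hx
    obtain ⟨i, hi, j, hj, rfl⟩ := hx
    simp only [List.length_replicate]
    omega
  rw [pv_getD_foldl_addAt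
    (fun x : Nat × Nat => (((x.1 : Nat) : Int) + ((x.2 : Nat) : Int)).toNat)
    (fun x : Nat × Nat => f.getD x.1 0 * g.getD x.2 0) _ _ hin t]
  rw [pv_getD_replicate_zero]
  have e2 : ∀ (i : Nat),
      (((List.range g.length).map (fun j => (i, j))).map
        (fun x : Nat × Nat =>
          if (((x.1 : Nat) : Int) + ((x.2 : Nat) : Int)).toNat = t
          then f.getD x.1 0 * g.getD x.2 0 else 0)).sum
      = ∑ j ∈ Finset.range g.length,
          if i + j = t then f.getD i 0 * g.getD j 0 else 0 := by
    intro i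
    rw [List.map_map, pv_sum_range]
    refine Finset.sum_congr rfl fun j _ => ?_
    simp only [Function.comp]
    exact if_congr (by omega) rfl rfl
  rw [pv_sum_flatMap_map]
  simp only [e2]
  rw [pv_sum_range, zero_add]

lemma pv_ite_sum (P : Prop) [Decidable P] (s : Finset Nat) (F : Nat → Int) :
    (if P then ∑ x ∈ s, F x else 0) = ∑ x ∈ s, if P then F x else 0 := by
  split <;> simp

-- the convolution of the pair counts with the third die counts the triples
lemma pv_key (a b c n : Nat) (ha : 1 ≤ a) (hb : 1 ≤ b) :
    (∑ m ∈ Finset.range (a + b - 1), ∑ k ∈ Finset.range c,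
        if m + k = n then (∑ i ∈ Finset.range a, ∑ j ∈ Finset.range b,
          if i + j = m then (1 : Int) else 0) else 0)
      = ∑ i ∈ Finset.range a, ∑ j ∈ Finset.range b, ∑ k ∈ Finset.range c,
          if i + j + k = n then (1 : Int) else 0 := by
  have step1 : (∑ m ∈ Finset.range (a + b - 1), ∑ k ∈ Finset.range c,
        if m + k = n then (∑ i ∈ Finset.range a, ∑ j ∈ Finset.range b,
          if i + j = m then (1 : Int) else 0) else 0)
      = ∑ m ∈ Finset.range (a + b - 1), ∑ k ∈ Finset.range c, ∑ i ∈ Finset.range a,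
          ∑ j ∈ Finset.range b, if m = i + j then (if i + j + k = n then (1 : Int) else 0) else 0 := by
    refine Finset.sum_congr rfl fun m _ => Finset.sum_congr rfl fun k _ => ?_
    rw [pv_ite_sum]
    refine Finset.sum_congr rfl fun i _ => ?_
    rw [pv_ite_sum]
    refine Finset.sum_congr rfl fun j _ => ?_
    split_ifs <;> first | rfl | omega
  rw [step1]
  -- push the sum over m innermost
  rw [Finset.sum_comm]
  have step2 : ∀ k ∈ Finset.range c,
      (∑ m ∈ Finset.range (a + b - 1), ∑ i ∈ Finset.range a, ∑ j ∈ Finset.range b,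
        if m = i + j then (if i + j + k = n then (1 : Int) else 0) else 0)
      = ∑ i ∈ Finset.range a, ∑ j ∈ Finset.range b,
          if i + j + k = n then (1 : Int) else 0 := by
    intro k _
    rw [Finset.sum_comm]
    refine Finset.sum_congr rfl fun i hi => ?_
    rw [Finset.sum_comm]
    refine Finset.sum_congr rfl fun j hj => ?_
    rw [Finset.sum_ite_eq' (Finset.range (a + b - 1)) (i + j)
      (fun _ => if i + j + k = n then (1 : Int) else 0)]
    rw [if_pos]
    rw [Finset.mem_range] at hi hj ⊢
    omega
  rw [Finset.sum_congr rfl step2]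
  rw [Finset.sum_comm]
  refine Finset.sum_congr rfl fun i _ => ?_
  rw [Finset.sum_comm]

-- B's distribution entry u equals A's frequency entry u + 3 (for most-common-sum purposes)
lemma dist_eq_freq (a b c : Nat) (ha : 1 ≤ a) (hb : 1 ≤ b) (hc : 1 ≤ c) (u : Nat) :
    (distB a b c).getD u 0 = (freqA a b c).getD (u + 3) 0 := by
  have hrep : ∀ m : Nat, PySem.List.pyRepeat [(1 : Int)] (m : Int) = List.replicate m 1 := by
    intro m
    rw [PySem.List.pyRepeat_singleton, Int.toNat_natCast]
  have hne : ∀ m : Nat, 1 ≤ m → (List.replicate m (1 : Int)) ≠ [] := by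
    intro m hm h
    have := congrArg List.length h
    simp at this
    omega
  have hgr : ∀ (m i : Nat), i < m → (List.replicate m (1 : Int)).getD i 0 = 1 := by
    intro m i him
    simp [List.getD_eq_getElem?_getD, him]
  have hd12len : (pvConv (List.replicate a (1 : Int)) (List.replicate b 1)).length = a + b - 1 := by
    rw [pvConv_length _ _ (hne a ha) (hne b hb)]
    simp
  have hd12ne : pvConv (List.replicate a (1 : Int)) (List.replicate b 1) ≠ [] := by
    intro h
    have := congrArg List.length h
    rw [hd12len] at this
    simp at this
    omega
  have hd12 : ∀ m : Nat, (pvConv (List.replicate a (1 : Int)) (List.replicate b 1)).getD m 0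
      = ∑ i ∈ Finset.range a, ∑ j ∈ Finset.range b, if i + j = m then (1 : Int) else 0 := by
    intro m
    rw [pvConv_getD _ _ (hne a ha) (hne b hb)]
    simp only [List.length_replicate]
    refine Finset.sum_congr rfl fun i hi => Finset.sum_congr rfl fun j hj => ?_
    rw [Finset.mem_range] at hi hj
    rw [hgr a i hi, hgr b j hj]
    norm_num
  unfold distB
  rw [show ((a : Nat) : Int) = (a : Int) from rfl] at *
  rw [hrep a, hrep b, hrep c]
  rw [pvConv_getD _ _ hd12ne (hne c hc)]
  rw [hd12len]
  simp only [List.length_replicate]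
  have hmid : (∑ m ∈ Finset.range (a + b - 1), ∑ k ∈ Finset.range c,
      if m + k = u then (pvConv (List.replicate a (1 : Int)) (List.replicate b 1)).getD m 0
        * (List.replicate c (1 : Int)).getD k 0 else 0)
      = ∑ m ∈ Finset.range (a + b - 1), ∑ k ∈ Finset.range c,
          if m + k = u then (∑ i ∈ Finset.range a, ∑ j ∈ Finset.range b,
            if i + j = m then (1 : Int) else 0) else 0 := by
    refine Finset.sum_congr rfl fun m _ => Finset.sum_congr rfl fun k hk => ?_
    rw [Finset.mem_range] at hk
    rw [hd12 m, hgr c k hk]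
    norm_num
  rw [hmid, pv_key a b c u ha hb]
  rw [freqA_getD]
  refine Finset.sum_congr rfl fun i _ => Finset.sum_congr rfl fun j _ => Finset.sum_congr rfl fun k _ => ?_
  refine if_congr ?_ rfl rfl
  omega

-- the two argmax scans: A tracks (best count, best sum), B tracks (best index, best count)
lemma pv_scan (v : Nat → Int) (N : Nat) :
    ((List.range N).foldl (fun (st : Int × Int) u =>
        if v u > st.1 then (v u, 3 + (u : Int)) else st) (0, 0)).1
      = ((List.range N).foldl (fun (st : Int × Int) u =>
          if v u > st.2 then ((u : Int), v u) else st) (-1, 0)).2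
    ∧ ((List.range N).foldl (fun (st : Int × Int) u =>
        if v u > st.1 then (v u, 3 + (u : Int)) else st) (0, 0)).2
      = (if ((List.range N).foldl (fun (st : Int × Int) u =>
          if v u > st.2 then ((u : Int), v u) else st) (-1, 0)).1 ≥ 0
         then ((List.range N).foldl (fun (st : Int × Int) u =>
          if v u > st.2 then ((u : Int), v u) else st) (-1, 0)).1 + 3 else 0) := by
  induction N with
  | zero => simp
  | succ n ih =>
      obtain ⟨ih1, ih2⟩ := ih
      rw [List.range_succ, List.foldl_append, List.foldl_append]
      simp only [List.foldl_cons, List.foldl_nil]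
      by_cases h : v n > ((List.range n).foldl (fun (st : Int × Int) u =>
          if v u > st.1 then (v u, 3 + (u : Int)) else st) (0, 0)).1
      · rw [if_pos h, if_pos (by rw [← ih1]; exact h)]
        refine ⟨rfl, ?_⟩
        rw [if_pos (by positivity)]
        omega
      · rw [if_neg h, if_neg (by rw [← ih1]; exact h)]
        exact ⟨ih1, ih2⟩

lemma pv_scan_zero : ∀ (l : List Int),
    (l.foldl (fun (st : Int × Int) s => if (0 : Int) > st.1 then ((0 : Int), s) else st) (0, 0))
      = (0, 0) := by
  intro l
  induction l with
  | nil => rfl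
  | cons x l ih => simpa using ih

-- A returns 0 whenever some die has no faces
lemma A_degenerate (s1 s2 s3 : Int) (h : s1 ≤ 0 ∨ s2 ≤ 0 ∨ s3 ≤ 0) :
    find_most_common_sum s1 s2 s3 = 0 := by
  have hfreq : freqA s1 s2 s3 = PySem.List.pyRepeat [0] (s1 + s2 + s3 + 1) := by
    unfold freqA
    rcases h with h | h | h
    · rw [PySem.List.pyRange_one_eq_nil (a := 1) (b := s1 + 1) (by omega)]
      rfl
    · rw [PySem.List.pyRange_one_eq_nil (a := 1) (b := s2 + 1) (by omega)]
      simp [List.foldl_fixed]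
    · rw [PySem.List.pyRange_one_eq_nil (a := 1) (b := s3 + 1) (by omega)]
      simp [List.foldl_fixed]
  have hz : ∀ (s : Int), (freqA s1 s2 s3).getD s.toNat 0 = 0 := by
    intro s
    rw [hfreq, PySem.List.pyRepeat_singleton]
    exact pv_getD_replicate_zero _ _
  rw [A_eq]
  have : (fun (st : Int × Int) s =>
      if (freqA s1 s2 s3).getD s.toNat 0 > st.1 then ((freqA s1 s2 s3).getD s.toNat 0, s) else st)
      = (fun (st : Int × Int) s => if (0 : Int) > st.1 then ((0 : Int), s) else st) := by
    funext st s
    rw [hz s]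
  rw [this, pv_scan_zero]

-- B returns 0 whenever some die has no faces
lemma B_degenerate (s1 s2 s3 : Int) (h : s1 ≤ 0 ∨ s2 ≤ 0 ∨ s3 ≤ 0) :
    find_most_common_sum_alt s1 s2 s3 = 0 := by
  unfold find_most_common_sum_alt
  rw [if_pos h]

-- the main case: all three dice have at least one face
lemma pv_main (a b c : Nat) (ha : 1 ≤ a) (hb : 1 ≤ b) (hc : 1 ≤ c) :
    find_most_common_sum a b c = find_most_common_sum_alt a b c := by
  set v : Nat → Int := fun u => (freqA a b c).getD (u + 3) 0 with hv
  have hN : ((a : Int) + b + c + 1 - 3).toNat = a + b + c - 2 := by omega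
  -- A's scan as a fold over List.range
  have hA : find_most_common_sum a b c
      = ((List.range (a + b + c - 2)).foldl (fun (st : Int × Int) u =>
          if v u > st.1 then (v u, 3 + (u : Int)) else st) (0, 0)).2 := by
    rw [A_eq]
    rw [PySem.List.pyRange_one, hN]
    rw [List.foldl_map]
    have hfun : (fun (st : Int × Int) (u : Nat) =>
        if (freqA a b c).getD ((3 : Int) + u).toNat 0 > st.1
        then ((freqA a b c).getD ((3 : Int) + u).toNat 0, (3 : Int) + u) else st)
        = (fun (st : Int × Int) (u : Nat) => if v u > st.1 then (v u, 3 + (u : Int)) else st) := by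
      funext st u
      have h3u : ((3 : Int) + (u : Nat)).toNat = u + 3 := by omega
      rw [h3u]
    rw [hfun]
  -- B's scan as a fold over List.range
  have hdlen : (distB a b c).length = a + b + c - 2 := by
    unfold distB
    have hrep : ∀ m : Nat, PySem.List.pyRepeat [(1 : Int)] (m : Int) = List.replicate m 1 := by
      intro m
      rw [PySem.List.pyRepeat_singleton, Int.toNat_natCast]
    have hne : ∀ m : Nat, 1 ≤ m → (List.replicate m (1 : Int)) ≠ [] := by
      intro m hm h
      have := congrArg List.length h
      simp at this
      omega
    rw [hrep a, hrep b, hrep c]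
    have h12 : (pvConv (List.replicate a (1 : Int)) (List.replicate b 1)).length = a + b - 1 := by
      rw [pvConv_length _ _ (hne a ha) (hne b hb)]
      simp
    have h12ne : pvConv (List.replicate a (1 : Int)) (List.replicate b 1) ≠ [] := by
      intro h
      have := congrArg List.length h
      rw [h12] at this
      simp at this
      omega
    rw [pvConv_length _ _ h12ne (hne c hc), h12]
    simp
    omega
  have hB : find_most_common_sum_alt a b c
      = (let r := (List.range (a + b + c - 2)).foldl (fun (st : Int × Int) u =>
            if v u > st.2 then ((u : Int), v u) else st) (-1, 0);
         if r.1 ≥ 0 then r.1 + 3 else 0) := by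
    rw [B_eq _ _ _ (by omega)]
    have hen : PySem.List.enumerate (distB a b c) 0
        = (List.range (a + b + c - 2)).map
            (fun u : Nat => ((u : Int), (distB a b c).getD u 0)) := by
      rw [PySem.List.enumerate_eq_map_pyRange (d := 0)]
      rw [show PySem.List.len (distB a b c) = ((distB a b c).length : Int) from rfl]
      rw [PySem.List.pyRange_one, hdlen]
      simp [List.map_map, Function.comp, PySem.List.pyGetD_natCast]
    rw [hen, List.foldl_map]
    have : (fun (st : Int × Int) (u : Nat) =>
        if (distB a b c).getD u 0 > st.2 then ((u : Int), (distB a b c).getD u 0) else st)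
        = (fun (st : Int × Int) (u : Nat) => if v u > st.2 then ((u : Int), v u) else st) := by
      funext st u
      rw [hv]
      simp only
      rw [dist_eq_freq a b c ha hb hc u]
    rw [this]
  rw [hA, hB]
  exact (pv_scan v (a + b + c - 2)).2

-- ===== VERDICT (by name: the statement is the Claim_ definition above) =====
theorem find_most_common_sum_spec : Claim_equal_find_most_common_sum := by
  intro s1 s2 s3 _
  unfold Spec_find_most_common_sum
  by_cases h : s1 ≤ 0 ∨ s2 ≤ 0 ∨ s3 ≤ 0
  · rw [A_degenerate s1 s2 s3 h, B_degenerate s1 s2 s3 h]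
  · have e1 : s1 = (s1.toNat : Int) := by omega
    have e2 : s2 = (s2.toNat : Int) := by omega
    have e3 : s3 = (s3.toNat : Int) := by omega
    rw [e1, e2, e3]
    exact pv_main s1.toNat s2.toNat s3.toNat (by omega) (by omega) (by omega)
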